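-- pv_equiv track=rewrite | github.com/ramc004/Python_PyCharm_Github | Sixth_Form/Easter Term -Year 12/Board Games for Half Term Project /Snakes and Ladders/Snakes-and-Ladders-to_follow/snakes and ladders (very detailed)/gameplay 2.py | negative_hard_movement
-- ===== SOURCE A (Python) =====
-- hard_board_points = [(600, 590), (0, 0), (50, 0), (100, 0), (150, 0), (200, 0), (250, 0), (300, 0), (350, 0),
--                      (400, 0), (450, 0), (450, -50), (400, -50), (350, -50), (300, -50), (250, -50), (200, -50),
--                      (150, -50), (100, -50), (50, -50), (0, -50), (0, -100), (50, -100), (100, -100),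
--                      (150, -100), (200, -100), (250, -100), (300, -100), (350, -100), (400, -100), (450, -100),
--                      (450, -150), (400, -150), (350, -150), (300, -150), (250, -150), (200, -150), (150, -150),
--                      (100, -150), (50, -150), (0, -150), (0, -200), (50, -200), (100, -200), (150, -200),
--                      (200, -200), (250, -200), (300, -200), (350, -200), (400, -200), (450, -200), (450, -250),
--                      (400, -250), (350, -250), (300, -250), (250, -250), (200, -250), (150, -250), (100, -250),
--                      (50, -250), (0, -250), (0, -300), (50, -300), (100, -300), (150, -300), (200, -300),
--                      (250, -300), (300, -300), (350, -300), (400, -300), (450, -300), (450, -350), (400, -350),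
--                      (350, -350), (300, -350), (250, -350), (200, -350), (150, -350), (100, -350), (50, -350),
--                      (0, -350), (0, -400), (50, -400), (100, -400), (150, -400), (200, -400), (250, -400),
--                      (300, -400), (350, -400), (400, -400), (450, -400), (450, -450), (400, -450), (350, -450),
--                      (300, -450), (250, -450), (200, -450), (150, -450), (100, -450), (50, -450), (0, -450)]
--
-- hard_board_rows = [[1, 2, 3, 4, 5, 6, 7, 8, 9, 10], [11, 12, 13, 14, 15, 16, 17, 18, 19, 20],
--                    [21, 22, 23, 24, 25, 26, 27, 28, 29, 30], [31, 32, 33, 34, 35, 36, 37, 38, 39, 40],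
--                    [41, 42, 43, 44, 45, 46, 47, 48, 49, 50], [51, 52, 53, 54, 55, 56, 57, 58, 59, 60],
--                    [61, 62, 63, 64, 65, 66, 67, 68, 69, 70], [71, 72, 73, 74, 75, 76, 77, 78, 79, 80],
--                    [81, 82, 83, 84, 85, 86, 87, 88, 89, 90], [91, 92, 93, 94, 95, 96, 97, 98, 99, 100]]
--
-- def current_hard_box(x, y):
--     """Gets the coordinates of the beads on the hard board and returns the box number in which the bead is present.
--     Arguments
--     ---------
--     x : int
--         The x-coordinate of the bead.
--     y : int
--         The y-coordinate of the bead.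
--     Return
--     ------
--     box : int
--         The number of box in which the bead is present."""
--     box = 1
--     for i in hard_board_points:
--         if i[0] <= x < i[0] + 50 and i[1] <= y < i[1] + 50:
--             box = hard_board_points.index(i)
--             break
--     return box
--
-- def negative_hard_movement(x, y):
--     """Gets the coordinates of the beads on the hard board and changes them according to the row and column of the board
--     in which the bead is present. This function is only for the negative values of the token.
--         Arguments
--         ---------
--         x : int
--             The x-coordinate of the bead.
--         y : int
--             The y-coordinate of the bead.
--         Return
--         ------
--         x : int
--             The x-coordinate of the bead.
--         y : int
--             The y-coordinate of the bead."""
--     row = 0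
--     for i in hard_board_rows:
--         if current_hard_box(x, y) in i:
--             row = hard_board_rows.index(i)
--     if current_hard_box(x, y) in [11, 21, 31, 41, 51, 61, 71, 81, 91] and (x == 0 or x == 450):
--         y += 50
--     else:
--         if row % 2 == 0:
--             x -= 5
--         else:
--             x += 5
--     return x, y
-- ===== SOURCE B (Python) =====
-- def negative_hard_movement(x, y):
--     # closed-form box computation instead of scanning hard_board_points
--     if 600 <= x < 650 and 590 <= y < 640:
--         box = 0
--     else:
--         c = x // 50
--         r = -(y // 50)
--         if 0 <= c < 10 and 0 <= r < 10:
--             box = 10 * r + c + 1 if r % 2 == 0 else 10 * r + 10 - c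
--         else:
--             box = 1
--     row = (box - 1) // 10 if 1 <= box else 0
--     if box % 10 == 1 and 11 <= box <= 91 and (x == 0 or x == 450):
--         y += 50
--     elif row % 2 == 0:
--         x -= 5
--     else:
--         x += 5
--     return x, y
-- ===== Notes on version B (the rewrite author's own statement) =====
-- stated objective: simpler
-- what changed: Replaced the 101-point list scan with .index lookups and the row-list membership/index loop by closed-form arithmetic on the coordinates (box and row computed directly from x//50 and y//50).
import Mathlib
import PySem

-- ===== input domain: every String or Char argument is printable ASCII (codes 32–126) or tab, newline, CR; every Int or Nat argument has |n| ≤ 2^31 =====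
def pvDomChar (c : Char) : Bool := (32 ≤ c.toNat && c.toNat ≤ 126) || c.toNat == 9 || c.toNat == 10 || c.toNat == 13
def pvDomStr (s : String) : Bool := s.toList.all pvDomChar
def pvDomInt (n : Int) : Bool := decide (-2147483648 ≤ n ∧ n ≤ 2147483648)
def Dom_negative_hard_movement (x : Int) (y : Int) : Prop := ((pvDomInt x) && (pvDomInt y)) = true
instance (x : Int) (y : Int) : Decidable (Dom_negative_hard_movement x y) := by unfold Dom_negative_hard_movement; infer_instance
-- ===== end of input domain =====

-- B replaces the point-list scan and row-list lookup with closed-form arithmetic on x, y (objective: simpler).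

-- ===== PORT A =====
def hard_board_points : List (Int × Int) :=
  [(600, 590), (0, 0), (50, 0), (100, 0), (150, 0), (200, 0), (250, 0), (300, 0), (350, 0), (400, 0), (450, 0), (450, -50), (400, -50), (350, -50), (300, -50), (250, -50), (200, -50), (150, -50), (100, -50), (50, -50), (0, -50), (0, -100), (50, -100), (100, -100), (150, -100), (200, -100), (250, -100), (300, -100), (350, -100), (400, -100), (450, -100), (450, -150), (400, -150), (350, -150), (300, -150), (250, -150), (200, -150), (150, -150), (100, -150), (50, -150), (0, -150), (0, -200), (50, -200), (100, -200), (150, -200), (200, -200), (250, -200), (300, -200), (350, -200), (400, -200), (450, -200), (450, -250), (400, -250), (350, -250), (300, -250), (250, -250), (200, -250), (150, -250), (100, -250), (50, -250), (0, -250), (0, -300), (50, -300), (100, -300), (150, -300), (200, -300), (250, -300), (300, -300), (350, -300), (400, -300), (450, -300), (450, -350), (400, -350), (350, -350), (300, -350), (250, -350), (200, -350), (150, -350), (100, -350), (50, -350), (0, -350), (0, -400), (50, -400), (100, -400), (150, -400), (200, -400), (250, -400), (300, -400), (350, -400), (400, -400), (450, -400), (450, -450), (400, -450), (350, -450), (300,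 -450), (250, -450), (200, -450), (150, -450), (100, -450), (50, -450), (0, -450)]

def hard_board_rows : List (List Int) :=
  [[1, 2, 3, 4, 5, 6, 7, 8, 9, 10],
   [11, 12, 13, 14, 15, 16, 17, 18, 19, 20],
   [21, 22, 23, 24, 25, 26, 27, 28, 29, 30],
   [31, 32, 33, 34, 35, 36, 37, 38, 39, 40],
   [41, 42, 43, 44, 45, 46, 47, 48, 49, 50],
   [51, 52, 53, 54, 55, 56, 57, 58, 59, 60],
   [61, 62, 63, 64, 65, 66, 67, 68, 69, 70],
   [71, 72, 73, 74, 75, 76, 77, 78, 79, 80],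
   [81, 82, 83, 84, 85, 86, 87, 88, 89, 90],
   [91, 92, 93, 94, 95, 96, 97, 98, 99, 100]]

-- for-loop with break over hard_board_points; .index(i) → PySem.List.index? (never none here: i is drawn from the list)
def chb_go (x : Int) (y : Int) : List (Int × Int) → Int
  | [] => 1
  | i :: rest =>
      if i.1 ≤ x ∧ x < i.1 + 50 ∧ i.2 ≤ y ∧ y < i.2 + 50 then
        (((PySem.List.index? hard_board_points i).getD 0 : Nat) : Int)
      else chb_go x y rest

def current_hard_box (x : Int) (y : Int) : Int := chb_go x y hard_board_points

def negative_hard_movement (x : Int) (y : Int) : Int × Int :=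
  let row : Int := hard_board_rows.foldl
    (fun row i => if current_hard_box x y ∈ i then (((PySem.List.index? hard_board_rows i).getD 0 : Nat) : Int) else row) 0
  if current_hard_box x y ∈ ([11, 21, 31, 41, 51, 61, 71, 81, 91] : List Int) ∧ (x = 0 ∨ x = 450) then
    (x, y + 50)
  else
    if PySem.Int.mod row 2 = 0 then (x - 5, y) else (x + 5, y)

-- ===== PORT B =====
def chb_alt (x : Int) (y : Int) : Int :=
  if 600 ≤ x ∧ x < 650 ∧ 590 ≤ y ∧ y < 640 then 0
  else
    let c := PySem.Int.floordiv x 50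
    let r := -(PySem.Int.floordiv y 50)
    if 0 ≤ c ∧ c < 10 ∧ 0 ≤ r ∧ r < 10 then
      if PySem.Int.mod r 2 = 0 then 10 * r + c + 1 else 10 * r + 10 - c
    else 1

def negative_hard_movement_alt (x : Int) (y : Int) : Int × Int :=
  let box := chb_alt x y
  let row := if 1 ≤ box then PySem.Int.floordiv (box - 1) 10 else 0
  if PySem.Int.mod box 10 = 1 ∧ 11 ≤ box ∧ box ≤ 91 ∧ (x = 0 ∨ x = 450) then
    (x, y + 50)
  else
    if PySem.Int.mod row 2 = 0 then (x - 5, y) else (x + 5, y)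

-- ===== PRECONDITION & SPEC =====
def Spec_negative_hard_movement (x : Int) (y : Int) (out : Int × Int) : Prop := out = negative_hard_movement_alt x y
instance (x : Int) (y : Int) (out : Int × Int) : Decidable (Spec_negative_hard_movement x y out) := by unfold Spec_negative_hard_movement; infer_instance

-- ===== CLAIM (what is proved, stated in full; the proofs are below) =====
def Claim_equal_negative_hard_movement : Prop := ∀ (x : Int) (y : Int), Dom_negative_hard_movement x y → Spec_negative_hard_movement x y (negative_hard_movement x y)


-- ===== LEMMAS AND PROOFS =====

-- coordinates of box j on the board, as a function of the index (matches hard_board_points, checked by decide below)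
def pointAt (j : Nat) : Int × Int :=
  if j = 0 then (600, 590)
  else if (j-1)/10 % 2 = 0 then (50 * (((j-1) % 10 : Nat) : Int), -50 * (((j-1)/10 : Nat) : Int))
  else (450 - 50 * (((j-1) % 10 : Nat) : Int), -50 * (((j-1)/10 : Nat) : Int))

theorem fact_len : hard_board_points.length = 101 := by decide

theorem fact_nodup : hard_board_points.Nodup := by decide

theorem fact_points : ∀ j < 101, hard_board_points.getD j (0,0) = pointAt j := by decide

theorem hbp_getElem (j : Nat) (hj : j < hard_board_points.length) :
    hard_board_points[j] = pointAt j := by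
  have h := fact_points j (by rw [fact_len] at hj; omega)
  rwa [List.getD_eq_getElem _ _ hj] at h

theorem index?_getElem (l : List (Int × Int)) (h : l.Nodup) (k : Nat) (hk : k < l.length) :
    PySem.List.index? l (l[k]) = some k := by
  rw [PySem.List.index?_eq_some_iff]
  refine ⟨l.take k, l.drop (k+1), ?_, by simp [Nat.min_eq_left hk.le], ?_⟩
  · conv_lhs => rw [← List.take_append_drop k l, List.drop_eq_getElem_cons hk]
  · intro hmem
    obtain ⟨j, hjl, hje⟩ := List.mem_iff_getElem.mp hmem
    have hjk : j < k := by simp at hjl; omega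
    rw [List.getElem_take] at hje
    exact absurd ((h.getElem_inj_iff).mp hje) (by omega)

theorem chb_go_none (x y : Int) (l : List (Int × Int))
    (h : ∀ p ∈ l, ¬(p.1 ≤ x ∧ x < p.1 + 50 ∧ p.2 ≤ y ∧ y < p.2 + 50)) :
    chb_go x y l = 1 := by
  induction l with
  | nil => rfl
  | cons p t ih =>
    simp only [chb_go]
    rw [if_neg (h p (by simp))]
    exact ih (fun q hq => h q (by simp [hq]))

theorem chb_go_append (x y : Int) (l1 l2 : List (Int × Int))
    (h : ∀ p ∈ l1, ¬(p.1 ≤ x ∧ x < p.1 + 50 ∧ p.2 ≤ y ∧ y < p.2 + 50)) :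
    chb_go x y (l1 ++ l2) = chb_go x y l2 := by
  induction l1 with
  | nil => rfl
  | cons p t ih =>
    simp only [List.cons_append, chb_go]
    rw [if_neg (h p (by simp))]
    exact ih (fun q hq => h q (by simp [hq]))

theorem chb_hit (x y : Int) (p : Int × Int) (l : List (Int × Int))
    (h : p.1 ≤ x ∧ x < p.1 + 50 ∧ p.2 ≤ y ∧ y < p.2 + 50) :
    chb_go x y (p :: l) = (((PySem.List.index? hard_board_points p).getD 0 : Nat) : Int) := by
  simp only [chb_go]
  rw [if_pos h]

-- the scan returns k when box k's square contains (x, y) and no earlier square does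
theorem chb_at (x y : Int) (k : Nat) (hk2 : k ≤ 100)
    (hcond : (pointAt k).1 ≤ x ∧ x < (pointAt k).1 + 50 ∧ (pointAt k).2 ≤ y ∧ y < (pointAt k).2 + 50)
    (hpre : ∀ j, j < k → ¬((pointAt j).1 ≤ x ∧ x < (pointAt j).1 + 50 ∧ (pointAt j).2 ≤ y ∧ y < (pointAt j).2 + 50)) :
    current_hard_box x y = (k : Int) := by
  have hkl : k < hard_board_points.length := by rw [fact_len]; omega
  rw [current_hard_box]
  conv_lhs => rw [← List.take_append_drop k hard_board_points, List.drop_eq_getElem_cons hkl]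
  rw [chb_go_append]
  · rw [hbp_getElem k hkl, chb_hit x y _ _ hcond, ← hbp_getElem k hkl,
       index?_getElem _ fact_nodup k hkl]
    rfl
  · intro p hp
    obtain ⟨j, hjl, hje⟩ := List.mem_iff_getElem.mp hp
    have hjk : j < k := by simp at hjl; omega
    rw [List.getElem_take, hbp_getElem j (by omega)] at hje
    rw [← hje]
    exact hpre j hjk

theorem box_bounds (x y : Int) : 0 ≤ chb_alt x y ∧ chb_alt x y ≤ 100 := by
  have h50 : ∀ a : Int, PySem.Int.floordiv a 50 = a / 50 :=
    fun a => PySem.Int.floordiv_eq_ediv_of_pos (by norm_num)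
  have h2 : ∀ a : Int, PySem.Int.mod a 2 = a % 2 :=
    fun a => PySem.Int.mod_eq_emod_of_pos (by norm_num)
  simp only [chb_alt, h50, h2]
  split_ifs <;> omega

set_option maxHeartbeats 1000000 in
theorem box_eq (x y : Int) : current_hard_box x y = chb_alt x y := by
  have h50 : ∀ a : Int, PySem.Int.floordiv a 50 = a / 50 :=
    fun a => PySem.Int.floordiv_eq_ediv_of_pos (by norm_num)
  have h2 : ∀ a : Int, PySem.Int.mod a 2 = a % 2 :=
    fun a => PySem.Int.mod_eq_emod_of_pos (by norm_num)
  simp only [chb_alt, h50, h2]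
  by_cases h0 : 600 ≤ x ∧ x < 650 ∧ 590 ≤ y ∧ y < 640
  · rw [if_pos h0]
    have := chb_at x y 0 (by omega) (by simp only [pointAt]; norm_num; omega)
      (by intro j hj; omega)
    simpa using this
  · rw [if_neg h0]
    by_cases hg : 0 ≤ x / 50 ∧ x / 50 < 10 ∧ 0 ≤ -(y / 50) ∧ -(y / 50) < 10
    · rw [if_pos hg]
      obtain ⟨hc1, hc2, hr1, hr2⟩ := hg
      have hx : 50 * (x / 50) ≤ x ∧ x < 50 * (x / 50) + 50 := by omega
      have hy : 50 * (y / 50) ≤ y ∧ y < 50 * (y / 50) + 50 := by omega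
      by_cases hpar : (-(y / 50)) % 2 = 0
      · rw [if_pos hpar]
        have := chb_at x y (10 * (-(y / 50)) + (x / 50) + 1).toNat (by omega)
          (by simp only [pointAt]; split_ifs <;> push_cast <;> omega)
          (by intro j hj hcond
              simp only [pointAt] at hcond
              split_ifs at hcond <;> push_cast at hcond <;> omega)
        rw [this]; omega
      · rw [if_neg hpar]
        have := chb_at x y (10 * (-(y / 50)) + 10 - (x / 50)).toNat (by omega)
          (by simp only [pointAt]; split_ifs <;> push_cast <;> omega)
          (by intro j hj hcond
              simp only [pointAt] at hcond
              split_ifs at hcond <;> push_cast at hcond <;> omega)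
        rw [this]; omega
    · rw [if_neg hg]
      rw [current_hard_box, chb_go_none]
      intro p hp hcond
      obtain ⟨j, hjl, hje⟩ := List.mem_iff_getElem.mp hp
      rw [hbp_getElem j hjl] at hje
      rw [← hje] at hcond
      simp only [pointAt] at hcond
      rw [fact_len] at hjl
      split_ifs at hcond <;> push_cast at hcond <;> omega

set_option maxHeartbeats 1000000 in
theorem row_eq (b : Int) (hb : 0 ≤ b ∧ b ≤ 100) :
    hard_board_rows.foldl
      (fun row i => if b ∈ i then (((PySem.List.index? hard_board_rows i).getD 0 : Nat) : Int) else row) 0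
    = if 1 ≤ b then (b - 1) / 10 else 0 := by
  have e0 : PySem.List.index? ([[1, 2, 3, 4, 5, 6, 7, 8, 9, 10], [11, 12, 13, 14, 15, 16, 17, 18, 19, 20], [21, 22, 23, 24, 25, 26, 27, 28, 29, 30], [31, 32, 33, 34, 35, 36, 37, 38, 39, 40], [41, 42, 43, 44, 45, 46, 47, 48, 49, 50], [51, 52, 53, 54, 55, 56, 57, 58, 59, 60], [61, 62, 63, 64, 65, 66, 67, 68, 69, 70], [71, 72, 73, 74, 75, 76, 77, 78, 79, 80], [81, 82, 83, 84, 85, 86, 87, 88, 89, 90], [91, 92, 93, 94, 95, 96, 97, 98, 99, 100]] : List (List Int)) [1,2,3,4,5,6,7,8,9,10] = some 0 := by decide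
  have e1 : PySem.List.index? ([[1, 2, 3, 4, 5, 6, 7, 8, 9, 10], [11, 12, 13, 14, 15, 16, 17, 18, 19, 20], [21, 22, 23, 24, 25, 26, 27, 28, 29, 30], [31, 32, 33, 34, 35, 36, 37, 38, 39, 40], [41, 42, 43, 44, 45, 46, 47, 48, 49, 50], [51, 52, 53, 54, 55, 56, 57, 58, 59, 60], [61, 62, 63, 64, 65, 66, 67, 68, 69, 70], [71, 72, 73, 74, 75, 76, 77, 78, 79, 80], [81, 82, 83, 84, 85, 86, 87, 88, 89, 90], [91, 92, 93, 94, 95, 96, 97, 98, 99, 100]] : List (List Int)) [11,12,13,14,15,16,17,18,19,20] = some 1 := by decide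
  have e2 : PySem.List.index? ([[1, 2, 3, 4, 5, 6, 7, 8, 9, 10], [11, 12, 13, 14, 15, 16, 17, 18, 19, 20], [21, 22, 23, 24, 25, 26, 27, 28, 29, 30], [31, 32, 33, 34, 35, 36, 37, 38, 39, 40], [41, 42, 43, 44, 45, 46, 47, 48, 49, 50], [51, 52, 53, 54, 55, 56, 57, 58, 59, 60], [61, 62, 63, 64, 65, 66, 67, 68, 69, 70], [71, 72, 73, 74, 75, 76, 77, 78, 79, 80], [81, 82, 83, 84, 85, 86, 87, 88, 89, 90], [91, 92, 93, 94, 95, 96, 97, 98, 99, 100]] : List (List Int)) [21,22,23,24,25,26,27,28,29,30] = some 2 := by decide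
  have e3 : PySem.List.index? ([[1, 2, 3, 4, 5, 6, 7, 8, 9, 10], [11, 12, 13, 14, 15, 16, 17, 18, 19, 20], [21, 22, 23, 24, 25, 26, 27, 28, 29, 30], [31, 32, 33, 34, 35, 36, 37, 38, 39, 40], [41, 42, 43, 44, 45, 46, 47, 48, 49, 50], [51, 52, 53, 54, 55, 56, 57, 58, 59, 60], [61, 62, 63, 64, 65, 66, 67, 68, 69, 70], [71, 72, 73, 74, 75, 76, 77, 78, 79, 80], [81, 82, 83, 84, 85, 86, 87, 88, 89, 90], [91, 92, 93, 94, 95, 96, 97, 98, 99, 100]] : List (List Int)) [31,32,33,34,35,36,37,38,39,40] = some 3 := by decide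
  have e4 : PySem.List.index? ([[1, 2, 3, 4, 5, 6, 7, 8, 9, 10], [11, 12, 13, 14, 15, 16, 17, 18, 19, 20], [21, 22, 23, 24, 25, 26, 27, 28, 29, 30], [31, 32, 33, 34, 35, 36, 37, 38, 39, 40], [41, 42, 43, 44, 45, 46, 47, 48, 49, 50], [51, 52, 53, 54, 55, 56, 57, 58, 59, 60], [61, 62, 63, 64, 65, 66, 67, 68, 69, 70], [71, 72, 73, 74, 75, 76, 77, 78, 79, 80], [81, 82, 83, 84, 85, 86, 87, 88, 89, 90], [91, 92, 93, 94, 95, 96, 97, 98, 99, 100]] : List (List Int)) [41,42,43,44,45,46,47,48,49,50] = some 4 := by decide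
  have e5 : PySem.List.index? ([[1, 2, 3, 4, 5, 6, 7, 8, 9, 10], [11, 12, 13, 14, 15, 16, 17, 18, 19, 20], [21, 22, 23, 24, 25, 26, 27, 28, 29, 30], [31, 32, 33, 34, 35, 36, 37, 38, 39, 40], [41, 42, 43, 44, 45, 46, 47, 48, 49, 50], [51, 52, 53, 54, 55, 56, 57, 58, 59, 60], [61, 62, 63, 64, 65, 66, 67, 68, 69, 70], [71, 72, 73, 74, 75, 76, 77, 78, 79, 80], [81, 82, 83, 84, 85, 86, 87, 88, 89, 90], [91, 92, 93, 94, 95, 96, 97, 98, 99, 100]] : List (List Int)) [51,52,53,54,55,56,57,58,59,60] = some 5 := by decide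
  have e6 : PySem.List.index? ([[1, 2, 3, 4, 5, 6, 7, 8, 9, 10], [11, 12, 13, 14, 15, 16, 17, 18, 19, 20], [21, 22, 23, 24, 25, 26, 27, 28, 29, 30], [31, 32, 33, 34, 35, 36, 37, 38, 39, 40], [41, 42, 43, 44, 45, 46, 47, 48, 49, 50], [51, 52, 53, 54, 55, 56, 57, 58, 59, 60], [61, 62, 63, 64, 65, 66, 67, 68, 69, 70], [71, 72, 73, 74, 75, 76, 77, 78, 79, 80], [81, 82, 83, 84, 85, 86, 87, 88, 89, 90], [91, 92, 93, 94, 95, 96, 97, 98, 99, 100]] : List (List Int)) [61,62,63,64,65,66,67,68,69,70] = some 6 := by decide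
  have e7 : PySem.List.index? ([[1, 2, 3, 4, 5, 6, 7, 8, 9, 10], [11, 12, 13, 14, 15, 16, 17, 18, 19, 20], [21, 22, 23, 24, 25, 26, 27, 28, 29, 30], [31, 32, 33, 34, 35, 36, 37, 38, 39, 40], [41, 42, 43, 44, 45, 46, 47, 48, 49, 50], [51, 52, 53, 54, 55, 56, 57, 58, 59, 60], [61, 62, 63, 64, 65, 66, 67, 68, 69, 70], [71, 72, 73, 74, 75, 76, 77, 78, 79, 80], [81, 82, 83, 84, 85, 86, 87, 88, 89, 90], [91, 92, 93, 94, 95, 96, 97, 98, 99, 100]] : List (List Int)) [71,72,73,74,75,76,77,78,79,80] = some 7 := by decide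
  have e8 : PySem.List.index? ([[1, 2, 3, 4, 5, 6, 7, 8, 9, 10], [11, 12, 13, 14, 15, 16, 17, 18, 19, 20], [21, 22, 23, 24, 25, 26, 27, 28, 29, 30], [31, 32, 33, 34, 35, 36, 37, 38, 39, 40], [41, 42, 43, 44, 45, 46, 47, 48, 49, 50], [51, 52, 53, 54, 55, 56, 57, 58, 59, 60], [61, 62, 63, 64, 65, 66, 67, 68, 69, 70], [71, 72, 73, 74, 75, 76, 77, 78, 79, 80], [81, 82, 83, 84, 85, 86, 87, 88, 89, 90], [91, 92, 93, 94, 95, 96, 97, 98, 99, 100]] : List (List Int)) [81,82,83,84,85,86,87,88,89,90] = some 8 := by decide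
  have e9 : PySem.List.index? ([[1, 2, 3, 4, 5, 6, 7, 8, 9, 10], [11, 12, 13, 14, 15, 16, 17, 18, 19, 20], [21, 22, 23, 24, 25, 26, 27, 28, 29, 30], [31, 32, 33, 34, 35, 36, 37, 38, 39, 40], [41, 42, 43, 44, 45, 46, 47, 48, 49, 50], [51, 52, 53, 54, 55, 56, 57, 58, 59, 60], [61, 62, 63, 64, 65, 66, 67, 68, 69, 70], [71, 72, 73, 74, 75, 76, 77, 78, 79, 80], [81, 82, 83, 84, 85, 86, 87, 88, 89, 90], [91, 92, 93, 94, 95, 96, 97, 98, 99, 100]] : List (List Int)) [91,92,93,94,95,96,97,98,99,100] = some 9 := by decide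
  simp only [hard_board_rows, List.foldl_cons, List.foldl_nil,
    e0, e1, e2, e3, e4, e5, e6, e7, e8, e9, Option.getD_some,
    List.mem_cons, List.not_mem_nil, or_false]
  split_ifs <;> omega

-- ===== VERDICT (by name: the statement is the Claim_ definition above) =====
set_option maxHeartbeats 1000000 in
theorem negative_hard_movement_spec : Claim_equal_negative_hard_movement := by
  intro x y _
  unfold Spec_negative_hard_movement
  have h2 : ∀ a : Int, PySem.Int.mod a 2 = a % 2 :=
    fun a => PySem.Int.mod_eq_emod_of_pos (by norm_num)
  have h10 : ∀ a : Int, PySem.Int.mod a 10 = a % 10 :=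
    fun a => PySem.Int.mod_eq_emod_of_pos (by norm_num)
  have hd10 : ∀ a : Int, PySem.Int.floordiv a 10 = a / 10 :=
    fun a => PySem.Int.floordiv_eq_ediv_of_pos (by norm_num)
  have hb := box_bounds x y
  simp only [negative_hard_movement, negative_hard_movement_alt, box_eq, h2, h10, hd10,
    row_eq (chb_alt x y) hb, List.mem_cons, List.not_mem_nil, or_false]
  split_ifs <;> first | rfl | (exfalso; omega)
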